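-- pv_equiv track=rewrite | github.com/marijnkoolen/fuzzy-search | fuzzy_search/fuzzy_string.py | score_ngram_overlap
-- ===== SOURCE A (Python) =====
-- from typing import List, Generator
--
-- def make_ngrams(text: str, n: int) -> List[str]:
--     """Turn a term string into a list of ngrams of size n
--
--     :param text: a text string
--     :type text: str
--     :param n: the ngram size
--     :type n: int
--     :return: a list of ngrams
--     :rtype: List[str]"""
--     if not isinstance(text, str):
--         raise TypeError('text must be a string')
--     if not isinstance(n, int):
--         raise TypeError('n must be a positive integer')
--     if n < 1:
--         raise ValueError('n must be a positive integer')
--     if n > len(text):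
--         return []
--     text = "#{t}#".format(t=text)
--     max_start = len(text) - n + 1
--     return [text[start:start + n] for start in range(0, max_start)]
--
-- def score_ngram_overlap(term1: str, term2: str, ngram_size: int):
--     """Score the number of overlapping ngrams between two terms
--
--     :param term1: a first term string
--     :type term1: str
--     :param term2: a second term string
--     :type term2: str
--     :param ngram_size: the character ngram size
--     :type ngram_size: int
--     :return: the number of overlapping ngrams
--     :rtype: int
--     """
--     term1_ngrams = make_ngrams(term1, ngram_size)
--     term2_ngrams = make_ngrams(term2, ngram_size)
--     overlap = 0
--     for ngram in term1_ngrams: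
--         if ngram in term2_ngrams:
--             term2_ngrams.pop(term2_ngrams.index(ngram))
--             overlap += 1
--     return overlap
-- ===== SOURCE B (Python) =====
-- from typing import List
--
-- def make_ngrams(text: str, n: int) -> List[str]:
--     if not isinstance(text, str):
--         raise TypeError('text must be a string')
--     if not isinstance(n, int):
--         raise TypeError('n must be a positive integer')
--     if n < 1:
--         raise ValueError('n must be a positive integer')
--     if n > len(text):
--         return []
--     text = "#{t}#".format(t=text)
--     max_start = len(text) - n + 1
--     return [text[start:start + n] for start in range(0, max_start)]
--
-- def score_ngram_overlap(term1: str, term2: str, ngram_size: int):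
--     """Sort both ngram lists once, then count common ngrams in a single merge pass."""
--     ngrams1 = sorted(make_ngrams(term1, ngram_size))
--     ngrams2 = sorted(make_ngrams(term2, ngram_size))
--     overlap = 0
--     i = j = 0
--     while i < len(ngrams1) and j < len(ngrams2):
--         if ngrams1[i] == ngrams2[j]:
--             overlap += 1
--             i += 1
--             j += 1
--         elif ngrams1[i] < ngrams2[j]:
--             i += 1
--         else:
--             j += 1
--     return overlap
-- ===== Notes on version B (the rewrite author's own statement) =====
-- stated objective: faster
-- what changed: Instead of scanning and mutating the second ngram list for every ngram of the first (in/index/pop), B sorts both ngram lists once and counts the common ngrams in a single two-pointer merge pass.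
import Mathlib
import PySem

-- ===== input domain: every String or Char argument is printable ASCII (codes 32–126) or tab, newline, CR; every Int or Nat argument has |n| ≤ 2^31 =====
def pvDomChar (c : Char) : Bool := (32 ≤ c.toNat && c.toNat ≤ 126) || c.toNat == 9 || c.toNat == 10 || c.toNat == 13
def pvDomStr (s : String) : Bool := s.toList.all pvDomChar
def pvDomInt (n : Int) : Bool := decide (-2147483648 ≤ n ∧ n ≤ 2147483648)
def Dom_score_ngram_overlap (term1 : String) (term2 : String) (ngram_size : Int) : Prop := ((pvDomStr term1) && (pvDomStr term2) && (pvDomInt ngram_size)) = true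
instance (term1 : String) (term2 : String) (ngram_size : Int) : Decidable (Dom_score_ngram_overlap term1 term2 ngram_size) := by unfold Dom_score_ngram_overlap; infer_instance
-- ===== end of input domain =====

-- B replaces A's repeated in/index/pop scans over the second ngram list by sorting both
-- ngram lists once and counting the common ngrams in a single merge pass (objective: faster).

-- ===== PORT A =====
-- make_ngrams, shared verbatim by both Pythons (B keeps it unchanged); ngrams are List Char.
-- The n < 1 branches raise in Python (excluded by Pre_); here the function just continues.
def pvMakeNgrams (text : List Char) (n : Int) : List (List Char) :=
  if n > (text.length : Int) then []
  else
    let t := '#' :: (text ++ ['#'])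
    let maxStart := (t.length : Int) - n + 1
    (PySem.List.pyRange 0 maxStart 1).map (fun start => PySem.List.slice t (some start) (some (start + n)))

def score_ngram_overlap (term1 : String) (term2 : String) (ngram_size : Int) : Int :=
  let term1_ngrams := pvMakeNgrams term1.toList ngram_size
  let term2_ngrams := pvMakeNgrams term2.toList ngram_size
  (term1_ngrams.foldl (fun st ngram =>
    if ngram ∈ st.1 then
      -- term2_ngrams.pop(term2_ngrams.index(ngram)); overlap += 1
      (match PySem.List.index? st.1 ngram with
       | some i =>
         match PySem.List.pop? st.1 (i : Int) with
         | some popped => popped.2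
         | none => st.1          -- unreachable (index? returns a valid index)
       | none => st.1,           -- unreachable (guarded by the membership test)
       st.2 + 1)
    else st) (term2_ngrams, 0)).2

-- ===== PORT B =====
-- sorted(ngrams): PySem.List.sorted under the lexicographic order on List Char
-- (Python's `<` on strings; the linear-order instance is named explicitly so that one
-- and the same order is used throughout the file)
def pvSortedL (xs : List (List Char)) : List (List Char) :=
  @PySem.List.sorted (List Char) (List Char)
    (@Preorder.toLT _ (@PartialOrder.toPreorder _ (@LinearOrder.toPartialOrder _ (@List.instLinearOrder Char instLinearOrderChar))))
    (@LinearOrder.toDecidableLT _ (@List.instLinearOrder Char instLinearOrderChar))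
    xs (fun x => x) false

-- the while-loop over indices i, j: each step consumes the head of one or both suffixes
def pvMerge : List (List Char) → List (List Char) → Int
  | [], _ => 0
  | _ :: _, [] => 0
  | x :: xs, y :: ys =>
    if x = y then 1 + pvMerge xs ys
    else if x < y then pvMerge xs (y :: ys)
    else pvMerge (x :: xs) ys
termination_by l1 l2 => l1.length + l2.length

def score_ngram_overlap_alt (term1 : String) (term2 : String) (ngram_size : Int) : Int :=
  let ngrams1 := pvSortedL (pvMakeNgrams term1.toList ngram_size)
  let ngrams2 := pvSortedL (pvMakeNgrams term2.toList ngram_size)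
  pvMerge ngrams1 ngrams2

-- ===== PRECONDITION & SPEC =====
-- Pre_ excludes exactly ngram_size < 1, where Python's make_ngrams raises ValueError (in both A and B).
def Pre_score_ngram_overlap (term1 : String) (term2 : String) (ngram_size : Int) : Prop :=
  1 ≤ ngram_size
instance (term1 : String) (term2 : String) (ngram_size : Int) : Decidable (Pre_score_ngram_overlap term1 term2 ngram_size) := by unfold Pre_score_ngram_overlap; infer_instance

def pvWitness_score_ngram_overlap : String × String × Int := ("grams", "ngram", 2)

def Spec_score_ngram_overlap (term1 : String) (term2 : String) (ngram_size : Int) (out : Int) : Prop := out = score_ngram_overlap_alt term1 term2 ngram_size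
instance (term1 : String) (term2 : String) (ngram_size : Int) (out : Int) : Decidable (Spec_score_ngram_overlap term1 term2 ngram_size out) := by unfold Spec_score_ngram_overlap; infer_instance

-- ===== CLAIM (what is proved, stated in full; the proofs are below) =====
def Claim_equal_score_ngram_overlap : Prop := ∀ (term1 : String) (term2 : String) (ngram_size : Int), Dom_score_ngram_overlap term1 term2 ngram_size → Pre_score_ngram_overlap term1 term2 ngram_size → Spec_score_ngram_overlap term1 term2 ngram_size (score_ngram_overlap term1 term2 ngram_size)

-- ===== LEMMAS AND PROOFS =====

-- recursive reformulation of A's loop: remove the first occurrence, count a hit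
def pvCnt : List (List Char) → List (List Char) → Int
  | [], _ => 0
  | x :: xs, l2 => if x ∈ l2 then 1 + pvCnt xs (l2.erase x) else pvCnt xs l2

theorem pvEraseIdx_append (pre suf : List (List Char)) (v : List Char) :
    (pre ++ v :: suf).eraseIdx pre.length = pre ++ suf := by
  induction pre with
  | nil => rfl
  | cons p rest ih => simpa using ih

-- Python's t2.pop(t2.index(g)) leaves t2.erase g when g ∈ t2
theorem pvPopIndex_eq (l : List (List Char)) (g : List Char) (h : g ∈ l) :
    (match PySem.List.index? l g with
     | some i =>
       match PySem.List.pop? l (i : Int) with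
       | some popped => popped.2
       | none => l
     | none => l) = l.erase g := by
  cases h' : PySem.List.index? l g with
  | none => exact absurd ((PySem.List.index?_eq_none_iff l g).mp h') (by simpa using h)
  | some i =>
    obtain ⟨pre, suf, hl, hlen, hvpre⟩ := (PySem.List.index?_eq_some_iff l g i).mp h'
    have hk : i < l.length := by subst hl hlen; simp
    simp only [PySem.List.pop?_natCast l i hk]
    subst hl hlen
    rw [pvEraseIdx_append, List.erase_append_right _ (by simpa using hvpre),
      List.erase_cons_head]

theorem pvLoopA_eq (l1 : List (List Char)) :
    ∀ (l2 : List (List Char)) (acc : Int),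
    (l1.foldl (fun st ngram =>
      if ngram ∈ st.1 then
        (match PySem.List.index? st.1 ngram with
         | some i =>
           match PySem.List.pop? st.1 (i : Int) with
           | some popped => popped.2
           | none => st.1
         | none => st.1,
         st.2 + 1)
      else st) (l2, acc)).2 = acc + pvCnt l1 l2 := by
  induction l1 with
  | nil => intro l2 acc; simp [pvCnt]
  | cons x xs ih =>
    intro l2 acc
    by_cases hx : x ∈ l2
    · simp only [List.foldl_cons, if_pos hx, pvPopIndex_eq l2 x hx, pvCnt, ih]
      ring
    · simp only [List.foldl_cons, pvCnt, ih, if_neg hx]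

-- List.erase under the BEq instance Multiset.coe_erase introduces equals the ambient one
theorem pvErase_inst (l : List (List Char)) (a : List Char) :
    @List.erase _ (@instBEqOfDecidableEq (List Char) (fun a b => instDecidableEqList a b)) l a
    = l.erase a := by
  induction l with
  | nil => rfl
  | cons h t ih =>
    by_cases hh : h = a
    · subst hh
      simp
    · simp [hh, ih]

theorem pvCnt_eq_card (l1 : List (List Char)) :
    ∀ l2 : List (List Char),
    pvCnt l1 l2 = (((l1 : Multiset (List Char)) ∩ (l2 : Multiset (List Char))).card : Int) := by
  induction l1 with
  | nil => intro l2; simp [pvCnt]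
  | cons x xs ih =>
    intro l2
    by_cases hx : x ∈ l2
    · rw [pvCnt, if_pos hx, ← Multiset.cons_coe,
        Multiset.cons_inter_of_pos _ (by simpa using hx),
        Multiset.card_cons, Multiset.coe_erase, pvErase_inst, ih]
      push_cast
      ring
    · rw [pvCnt, if_neg hx, ← Multiset.cons_coe,
        Multiset.cons_inter_of_neg _ (by simpa using hx), ih]

theorem pvMerge_eq_card (l1 l2 : List (List Char))
    (h1 : l1.Pairwise (· ≤ ·)) (h2 : l2.Pairwise (· ≤ ·)) :
    pvMerge l1 l2 = (((l1 : Multiset (List Char)) ∩ (l2 : Multiset (List Char))).card : Int) := by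
  induction l1, l2 using pvMerge.induct with
  | case1 l2 => simp [pvMerge]
  | case2 x xs => simp [pvMerge]
  | case3 xs y ys ih =>
    rw [pvMerge, if_pos rfl,
      ih (List.Pairwise.sublist (List.sublist_cons_self y xs) h1)
         (List.Pairwise.sublist (List.sublist_cons_self y ys) h2),
      ← Multiset.cons_coe, ← Multiset.cons_coe,
      Multiset.cons_inter_of_pos _ (by simp : y ∈ (y ::ₘ (ys : Multiset (List Char)))),
      show ((y ::ₘ (ys : Multiset (List Char))).erase y) = (ys : Multiset (List Char)) by simp,
      Multiset.card_cons]
    omega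
  | case4 x xs y ys hne hlt ih =>
    have hx : x ∉ (y :: ys) := by
      intro hmem
      rcases List.mem_cons.mp hmem with h | h
      · exact hne h
      · exact absurd hlt (not_lt.mpr (List.rel_of_pairwise_cons h2 h))
    rw [pvMerge, if_neg hne, if_pos hlt,
      ih (List.Pairwise.sublist (List.sublist_cons_self x xs) h1) h2,
      show ((x :: xs : List (List Char)) : Multiset (List Char)) = x ::ₘ (xs : Multiset (List Char)) from (Multiset.cons_coe x xs).symm,
      Multiset.cons_inter_of_neg _ (by simpa using hx)]
  | case5 x xs y ys hne hnlt ih =>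
    have hyx : y < x := lt_of_le_of_ne (not_lt.mp hnlt) (fun e => hne e.symm)
    have hy : y ∉ (x :: xs) := by
      intro hmem
      rcases List.mem_cons.mp hmem with h | h
      · exact absurd hyx (h ▸ lt_irrefl x)
      · exact absurd hyx (not_lt.mpr (List.rel_of_pairwise_cons h1 h))
    have key : ((x :: xs : List (List Char)) : Multiset (List Char)) ∩ ((y :: ys : List (List Char)) : Multiset (List Char))
        = ((x :: xs : List (List Char)) : Multiset (List Char)) ∩ ((ys : List (List Char)) : Multiset (List Char)) := by
      rw [Multiset.inter_comm, ← Multiset.cons_coe,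
        Multiset.cons_inter_of_neg _ (by simpa using hy), Multiset.inter_comm]
    rw [pvMerge, if_neg hne, if_neg hnlt,
      ih h1 (List.Pairwise.sublist (List.sublist_cons_self y ys) h2), key]

-- ===== VERDICT (by name: the statement is the Claim_ definition above) =====
theorem score_ngram_overlap_spec : Claim_equal_score_ngram_overlap := by
  intro term1 term2 ngram_size _ _
  unfold Spec_score_ngram_overlap
  simp only [score_ngram_overlap, score_ngram_overlap_alt]
  have hp1 : (pvSortedL (pvMakeNgrams term1.toList ngram_size)).Perm (pvMakeNgrams term1.toList ngram_size) := by
    unfold pvSortedL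
    exact @PySem.List.sorted_perm (List Char) (List Char)
      (@Preorder.toLT _ (@PartialOrder.toPreorder _ (@LinearOrder.toPartialOrder _ (@List.instLinearOrder Char instLinearOrderChar))))
      (@LinearOrder.toDecidableLT _ (@List.instLinearOrder Char instLinearOrderChar)) _ (fun x => x) false
  have hp2 : (pvSortedL (pvMakeNgrams term2.toList ngram_size)).Perm (pvMakeNgrams term2.toList ngram_size) := by
    unfold pvSortedL
    exact @PySem.List.sorted_perm (List Char) (List Char)
      (@Preorder.toLT _ (@PartialOrder.toPreorder _ (@LinearOrder.toPartialOrder _ (@List.instLinearOrder Char instLinearOrderChar))))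
      (@LinearOrder.toDecidableLT _ (@List.instLinearOrder Char instLinearOrderChar)) _ (fun x => x) false
  rw [pvLoopA_eq, pvCnt_eq_card,
    pvMerge_eq_card _ _
      (by simpa [pvSortedL] using PySem.List.sorted_pairwise (pvMakeNgrams term1.toList ngram_size) (fun x => x))
      (by simpa [pvSortedL] using PySem.List.sorted_pairwise (pvMakeNgrams term2.toList ngram_size) (fun x => x)),
    Multiset.coe_eq_coe.mpr hp1, Multiset.coe_eq_coe.mpr hp2]
  omega
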